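-- pv_equiv track=rewrite | github.com/somebodnew/OmGTU | MOSI/д4/MOSI.py | encrypt_blocks
-- ===== SOURCE A (Python) =====
-- def binary_pow(base, exponent, modulus):
--     result = 1
--     base = base % modulus
--
--     while exponent > 0:
--         if exponent & 1:
--             result = (result * base) % modulus
--         base = (base * base) % modulus
--         exponent >>= 1
--
--     return result
--
-- def encrypt_blocks(blocks, public_key):
--     e, n = public_key
--     encrypted_blocks = []
--
--     for block in blocks:
--         if block >= n:
--             raise ValueError(f"Блок {block} больше или равен модулю n={n}")
--
--         encrypted_block = binary_pow(block, e, n)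
--         encrypted_blocks.append(encrypted_block)
--
--     return encrypted_blocks
-- ===== SOURCE B (Python) =====
-- def binary_pow(base, exponent, modulus):
--     if exponent <= 0:
--         return 1
--     half = binary_pow(base, exponent // 2, modulus)
--     result = (half * half) % modulus
--     if exponent & 1:
--         result = (result * base) % modulus
--     return result
--
--
-- def encrypt_blocks(blocks, public_key):
--     e, n = public_key
--     for block in blocks:
--         if block >= n:
--             raise ValueError(f"Блок {block} больше или равен модулю n={n}")
--     return [binary_pow(block, e, n) for block in blocks]
-- ===== Notes on version B (the rewrite author's own statement) =====
-- stated objective: alternative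
-- what changed: The iterative bit-scanning squaring loop (result/base accumulators mutated while shifting the exponent) is replaced by recursive divide-and-conquer exponentiation on exponent//2, and the outer loop is split into a validate-all pass followed by a list-comprehension map.
import Mathlib
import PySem

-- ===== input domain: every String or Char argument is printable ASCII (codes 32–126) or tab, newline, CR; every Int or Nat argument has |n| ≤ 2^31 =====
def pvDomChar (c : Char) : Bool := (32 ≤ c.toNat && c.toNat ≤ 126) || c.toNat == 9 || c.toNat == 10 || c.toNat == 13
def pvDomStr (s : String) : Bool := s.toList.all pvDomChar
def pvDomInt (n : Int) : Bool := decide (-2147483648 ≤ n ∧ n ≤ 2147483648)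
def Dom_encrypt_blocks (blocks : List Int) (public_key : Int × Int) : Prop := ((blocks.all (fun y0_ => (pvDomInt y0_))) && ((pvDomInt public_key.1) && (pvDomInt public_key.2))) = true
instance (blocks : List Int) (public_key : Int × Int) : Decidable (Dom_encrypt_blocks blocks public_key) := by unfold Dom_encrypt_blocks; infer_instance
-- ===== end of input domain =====

-- B replaces A's iterative bit-scanning squaring loop by recursive divide-and-conquer exponentiation
-- on exponent//2, and validates all blocks first before mapping; same cost ('alternative'), return value equal.


-- ===== PORT A =====
-- while exponent > 0: (result, base, exponent) are the mutated loop state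
def binPowLoop (result base exponent modulus : Int) : Int :=
  if 0 < exponent then
    binPowLoop
      (if PySem.Int.band exponent 1 ≠ 0 then PySem.Int.mod (result * base) modulus else result)
      (PySem.Int.mod (base * base) modulus)
      (exponent >>> (1 : Nat)) modulus
  else result
termination_by exponent.toNat
decreasing_by
  have h1 : exponent >>> (1 : Nat) = exponent / 2 ^ 1 := Int.shiftRight_eq_div_pow exponent 1
  omega

def binary_pow (base exponent modulus : Int) : Int :=
  binPowLoop 1 (PySem.Int.mod base modulus) exponent modulus

-- for block in blocks: accumulator = encrypted_blocks; the `raise ValueError` branch is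
-- unreachable under Pre_ and ported as returning the accumulator so far
def encBlocksLoop (blocks : List Int) (e n : Int) (acc : List Int) : List Int :=
  match blocks with
  | [] => acc
  | b :: rest =>
      if b ≥ n then acc  -- raise ValueError(...): excluded by Pre_encrypt_blocks
      else encBlocksLoop rest e n (acc ++ [binary_pow b e n])

def encrypt_blocks (blocks : List Int) (public_key : Int × Int) : List Int :=
  encBlocksLoop blocks public_key.1 public_key.2 []

-- ===== PORT B =====
def binary_pow_alt (base exponent modulus : Int) : Int :=
  if exponent ≤ 0 then 1
  else
    let half := binary_pow_alt base (PySem.Int.floordiv exponent 2) modulus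
    let result := PySem.Int.mod (half * half) modulus
    if PySem.Int.band exponent 1 ≠ 0 then PySem.Int.mod (result * base) modulus else result
termination_by exponent.toNat
decreasing_by
  have h1 : PySem.Int.floordiv exponent 2 = exponent / 2 := PySem.Int.floordiv_eq_ediv_of_pos (by omega)
  omega

-- the validation pass raises (excluded by Pre_); ported as returning []
def encrypt_blocks_alt (blocks : List Int) (public_key : Int × Int) : List Int :=
  if blocks.all (fun b => decide (b < public_key.2)) then
    blocks.map (fun b => binary_pow_alt b public_key.1 public_key.2)
  else []

-- ===== PRECONDITION & SPEC =====
-- Pre_ excludes exactly the inputs where A raises: a block ≥ n (ValueError), and n = 0 with a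
-- nonempty block list (ZeroDivisionError in `base % modulus`).
def Pre_encrypt_blocks (blocks : List Int) (public_key : Int × Int) : Prop :=
  (∀ b ∈ blocks, b < public_key.2) ∧ (blocks = [] ∨ public_key.2 ≠ 0)
instance (blocks : List Int) (public_key : Int × Int) : Decidable (Pre_encrypt_blocks blocks public_key) := by unfold Pre_encrypt_blocks; infer_instance

def pvWitness_encrypt_blocks : List Int × (Int × Int) := ([2, 3], (5, 7))

def Spec_encrypt_blocks (blocks : List Int) (public_key : Int × Int) (out : List Int) : Prop := out = encrypt_blocks_alt blocks public_key
instance (blocks : List Int) (public_key : Int × Int) (out : List Int) : Decidable (Spec_encrypt_blocks blocks public_key out) := by unfold Spec_encrypt_blocks; infer_instance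

-- ===== CLAIM (what is proved, stated in full; the proofs are below) =====
def Claim_equal_encrypt_blocks : Prop := ∀ (blocks : List Int) (public_key : Int × Int), Dom_encrypt_blocks blocks public_key → Pre_encrypt_blocks blocks public_key → Spec_encrypt_blocks blocks public_key (encrypt_blocks blocks public_key)

-- ===== LEMMAS AND PROOFS =====

-- Python % (= PySem.Int.mod = Int.fmod) only depends on the argument's residue class mod m ≠ 0
theorem pymod_modEq (a m : Int) : PySem.Int.mod a m ≡ a [ZMOD m] := by
  have h := PySem.Int.floordiv_mul_add_mod a m
  have : m ∣ a - PySem.Int.mod a m := ⟨PySem.Int.floordiv a m, by linarith⟩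
  exact Int.modEq_iff_dvd.mpr this

theorem pymod_congr {a b m : Int} (hm : m ≠ 0) (h : a ≡ b [ZMOD m]) :
    PySem.Int.mod a m = PySem.Int.mod b m := by
  have hd : m ∣ PySem.Int.mod b m - PySem.Int.mod a m :=
    ((pymod_modEq a m).trans (h.trans (pymod_modEq b m).symm)).dvd
  rcases lt_or_gt_of_ne hm with hneg | hpos
  · have h1 := PySem.Int.mod_neg_bounds a hneg
    have h2 := PySem.Int.mod_neg_bounds b hneg
    rcases hd with ⟨k, hk⟩
    rcases lt_trichotomy k 0 with hk0 | hk0 | hk0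
    · nlinarith
    · subst hk0; simp at hk; omega
    · nlinarith
  · have h1a := PySem.Int.mod_nonneg a hpos
    have h1b := PySem.Int.mod_lt a hpos
    have h2a := PySem.Int.mod_nonneg b hpos
    have h2b := PySem.Int.mod_lt b hpos
    rcases hd with ⟨k, hk⟩
    rcases lt_trichotomy k 0 with hk0 | hk0 | hk0
    · nlinarith
    · subst hk0; simp at hk; omega
    · nlinarith

-- exponent & 1 for positive exponents, via band_one : band a 1 = mod a 2
theorem band_one_ne_iff (e : Int) (_he : 0 < e) : (PySem.Int.band e 1 ≠ 0) ↔ e % 2 = 1 := by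
  rw [PySem.Int.band_one, PySem.Int.mod_eq_emod_of_pos (by norm_num)]
  omega

theorem shiftRight_one_pos (e : Int) : e >>> (1 : Nat) = e / 2 := by
  have := Int.shiftRight_eq_div_pow e 1
  simpa using this

-- A's loop computes (result * base ^ exponent) % modulus, for positive exponent
theorem binPowLoop_eq (m : Int) (hm : m ≠ 0) :
    ∀ (fuel : Nat) (e r b : Int), 0 < e → e.toNat ≤ fuel →
      binPowLoop r b e m = PySem.Int.mod (r * b ^ e.toNat) m := by
  intro fuel
  induction fuel with
  | zero => intro e r b he hf; omega
  | succ k ih =>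
    intro e r b he hf
    rw [binPowLoop, if_pos he]
    have hsh : e >>> (1 : Nat) = e / 2 := shiftRight_one_pos e
    by_cases h2 : 0 < e / 2
    · -- recursive call still loops
      have hsplit : e.toNat = 2 * (e / 2).toNat + (e % 2).toNat := by omega
      by_cases hodd : PySem.Int.band e 1 ≠ 0
      · have hmod2 : e % 2 = 1 := (band_one_ne_iff e he).mp hodd
        rw [if_pos hodd, hsh,
            ih (e / 2) (PySem.Int.mod (r * b) m) (PySem.Int.mod (b * b) m) h2 (by omega)]
        apply pymod_congr hm
        calc PySem.Int.mod (r * b) m * PySem.Int.mod (b * b) m ^ (e / 2).toNat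
            ≡ (r * b) * (b * b) ^ (e / 2).toNat [ZMOD m] :=
              (pymod_modEq (r * b) m).mul ((pymod_modEq (b * b) m).pow _)
          _ = r * b ^ e.toNat := by
              have hq : e.toNat = 2 * (e / 2).toNat + 1 := by omega
              rw [hq, pow_succ, pow_mul, pow_two]; ring
      · have hmod2 : e % 2 = 0 := by
          have := (band_one_ne_iff e he).not
          simp only [not_not] at this
          omega
        rw [if_neg hodd, hsh, ih (e / 2) r (PySem.Int.mod (b * b) m) h2 (by omega)]
        apply pymod_congr hm
        calc r * PySem.Int.mod (b * b) m ^ (e / 2).toNat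
            ≡ r * (b * b) ^ (e / 2).toNat [ZMOD m] :=
              Int.ModEq.mul_left r ((pymod_modEq (b * b) m).pow _)
          _ = r * b ^ e.toNat := by
              have hq : e.toNat = 2 * (e / 2).toNat := by omega
              rw [hq, pow_mul, pow_two]
    · -- e = 1: recursive call returns its result argument
      have he1 : e = 1 := by omega
      subst he1
      have hodd : PySem.Int.band (1 : Int) 1 ≠ 0 := by decide
      rw [if_pos hodd, hsh]
      rw [binPowLoop]
      norm_num

-- B's recursion computes base ^ exponent % modulus, for positive exponent
theorem binary_pow_alt_eq (m : Int) (hm : m ≠ 0) :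
    ∀ (fuel : Nat) (e b : Int), 0 < e → e.toNat ≤ fuel →
      binary_pow_alt b e m = PySem.Int.mod (b ^ e.toNat) m := by
  intro fuel
  induction fuel with
  | zero => intro e b he hf; omega
  | succ k ih =>
    intro e b he hf
    rw [binary_pow_alt, if_neg (by omega)]
    have hfd : PySem.Int.floordiv e 2 = e / 2 := PySem.Int.floordiv_eq_ediv_of_pos (by norm_num)
    have hsplit : e.toNat = 2 * (e / 2).toNat + (e % 2).toNat := by omega
    have hhalf : binary_pow_alt b (PySem.Int.floordiv e 2) m ≡ b ^ (e / 2).toNat [ZMOD m] := by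
      by_cases h2 : 0 < e / 2
      · rw [hfd, ih (e / 2) b h2 (by omega)]
        exact pymod_modEq _ m
      · have : e / 2 = 0 := by omega
        rw [hfd, this, binary_pow_alt]
        simp
    by_cases hodd : PySem.Int.band e 1 ≠ 0
    · have hmod2 : e % 2 = 1 := (band_one_ne_iff e he).mp hodd
      rw [if_pos hodd]
      apply pymod_congr hm
      calc PySem.Int.mod (binary_pow_alt b (PySem.Int.floordiv e 2) m *
              binary_pow_alt b (PySem.Int.floordiv e 2) m) m * b
          ≡ (b ^ (e / 2).toNat * b ^ (e / 2).toNat) * b [ZMOD m] :=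
            Int.ModEq.mul ((pymod_modEq _ m).trans (hhalf.mul hhalf)) Int.ModEq.rfl
        _ = b ^ e.toNat := by
            have hq : e.toNat = 2 * (e / 2).toNat + 1 := by omega
            rw [hq, pow_succ, two_mul, pow_add]
    · have hmod2 : e % 2 = 0 := by
        have := (band_one_ne_iff e he).not
        simp only [not_not] at this
        omega
      rw [if_neg hodd]
      apply pymod_congr hm
      calc binary_pow_alt b (PySem.Int.floordiv e 2) m *
              binary_pow_alt b (PySem.Int.floordiv e 2) m
          ≡ b ^ (e / 2).toNat * b ^ (e / 2).toNat [ZMOD m] := hhalf.mul hhalf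
        _ = b ^ e.toNat := by
            have hq : e.toNat = 2 * (e / 2).toNat := by omega
            rw [hq, two_mul, pow_add]

-- the two exponentiation helpers agree whenever the modulus is nonzero
theorem binary_pow_agree (b e m : Int) (hm : m ≠ 0) : binary_pow b e m = binary_pow_alt b e m := by
  by_cases he : 0 < e
  · rw [binary_pow,
        binPowLoop_eq m hm e.toNat e 1 (PySem.Int.mod b m) he le_rfl,
        binary_pow_alt_eq m hm e.toNat e b he le_rfl]
    apply pymod_congr hm
    calc 1 * PySem.Int.mod b m ^ e.toNat
        ≡ 1 * b ^ e.toNat [ZMOD m] := Int.ModEq.mul_left 1 ((pymod_modEq b m).pow _)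
      _ = b ^ e.toNat := one_mul _
  · rw [binary_pow, binPowLoop, if_neg he, binary_pow_alt, if_pos (by omega)]

theorem encBlocksLoop_eq (e n : Int) (hn : n ≠ 0) :
    ∀ (blocks : List Int) (acc : List Int), (∀ b ∈ blocks, b < n) →
      encBlocksLoop blocks e n acc = acc ++ blocks.map (fun b => binary_pow_alt b e n) := by
  intro blocks
  induction blocks with
  | nil => intro acc _; simp [encBlocksLoop]
  | cons b rest ih =>
    intro acc hlt
    rw [encBlocksLoop]
    have hb : b < n := hlt b (by simp)
    rw [if_neg (by omega), ih _ (fun x hx => hlt x (by simp [hx])),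
        binary_pow_agree b e n hn]
    simp

-- ===== VERDICT (by name: the statement is the Claim_ definition above) =====
theorem encrypt_blocks_spec : Claim_equal_encrypt_blocks := by
  intro blocks pk _ hpre
  obtain ⟨hlt, hnz⟩ := hpre
  unfold Spec_encrypt_blocks encrypt_blocks encrypt_blocks_alt
  rcases hnz with rfl | hn
  · simp [encBlocksLoop]
  · rw [if_pos (by simpa using hlt), encBlocksLoop_eq pk.1 pk.2 hn blocks [] hlt]
    simp
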